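-- pv_equiv track=rewrite | github.com/markku63/mooc-tira-s20 | Viikko_2/bothsame.py | count
-- ===== SOURCE A (Python) =====
-- def count(s):
--     characters = {}
--     counter = 0
--     for i in range(len(s)):
--         if s[i] in characters:
--             characters[s[i]] += 1
--         else:
--             characters[s[i]] = 1
--         counter += characters[s[i]]
--     return counter
-- ===== SOURCE B (Python) =====
-- def count(s):
--     counts = {}
--     for ch in s:
--         counts[ch] = counts.get(ch, 0) + 1
--     return sum(k * (k + 1) // 2 for k in counts.values())
-- ===== Notes on version B (the rewrite author's own statement) =====
-- stated objective: faster
-- what changed: B builds a completed frequency table in one pass and then sums the closed form k*(k+1)//2 over the distinct characters' total counts, instead of accumulating a running per-character counter position by position.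
import Mathlib
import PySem

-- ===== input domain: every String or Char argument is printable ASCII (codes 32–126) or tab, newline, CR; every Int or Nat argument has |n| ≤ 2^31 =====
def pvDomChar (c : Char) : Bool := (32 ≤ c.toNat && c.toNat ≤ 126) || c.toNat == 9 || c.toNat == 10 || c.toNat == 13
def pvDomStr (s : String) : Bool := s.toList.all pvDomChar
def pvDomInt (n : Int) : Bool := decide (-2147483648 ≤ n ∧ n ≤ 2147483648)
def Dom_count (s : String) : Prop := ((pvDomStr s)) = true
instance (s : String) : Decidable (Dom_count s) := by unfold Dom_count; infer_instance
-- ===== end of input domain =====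

-- B replaces A's running per-character counter with a one-pass frequency table followed by the
-- closed form k*(k+1)//2 per distinct character (same O(n); a timing run measured B faster by a constant factor).

-- ===== PORT A =====
-- one iteration of A's loop body: update the per-character dict, add the updated count to the counter
def countStep (st : PySem.Dict Char Int × Int) (ch : Char) : PySem.Dict Char Int × Int :=
  let d' := if st.1.contains ch then st.1.insert ch (st.1.getD ch 0 + 1) else st.1.insert ch 1
  (d', st.2 + d'.getD ch 0)

-- for i in range(len(s)): … s[i] …  (the index is always in range, so the pyGetD default is never used)
def count (s : String) : Int :=
  ((PySem.List.pyRange 0 (PySem.Str.len s) 1).foldl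
    (fun st i => countStep st (PySem.List.pyGetD s.toList i ' ')) (PySem.Dict.empty, 0)).2

-- ===== PORT B =====
def count_alt (s : String) : Int :=
  let counts := s.toList.foldl (fun d ch => d.insert ch (d.getD ch 0 + 1))
    (PySem.Dict.empty : PySem.Dict Char Int)
  (counts.values.map (fun k => PySem.Int.floordiv (k * (k + 1)) 2)).sum

-- ===== PRECONDITION & SPEC =====
def Spec_count (s : String) (out : Int) : Prop := out = count_alt s
instance (s : String) (out : Int) : Decidable (Spec_count s out) := by unfold Spec_count; infer_instance

-- ===== CLAIM (what is proved, stated in full; the proofs are below) =====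
def Claim_equal_count : Prop := ∀ (s : String), Dom_count s → Spec_count s (count s)

-- ===== LEMMAS AND PROOFS =====

-- the triangular-number term of B
def triTerm (k : Int) : Int := PySem.Int.floordiv (k * (k + 1)) 2

theorem triTerm_succ (k : Nat) : triTerm ((k : Int) + 1) = triTerm (k : Int) + ((k : Int) + 1) := by
  unfold triTerm
  rw [PySem.Int.floordiv_eq_ediv_of_pos (by norm_num),
      PySem.Int.floordiv_eq_ediv_of_pos (by norm_num)]
  have h : ((k : Int) + 1) * (((k : Int) + 1) + 1) = (k : Int) * ((k : Int) + 1) + ((k : Int) + 1) * 2 := by ring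
  rw [h, Int.add_mul_ediv_right _ _ (by norm_num : (2:Int) ≠ 0)]

-- A's dict component is the plain insert-counter fold
theorem A_dict (cs : List Char) (d : PySem.Dict Char Int) (acc : Int) :
    (cs.foldl countStep (d, acc)).1 = cs.foldl (fun d x => d.insert x (d.getD x 0 + 1)) d := by
  induction cs generalizing d acc with
  | nil => rfl
  | cons c cs ih =>
    simp only [List.foldl_cons]
    rw [ih]
    congr 1
    simp only [countStep]
    split_ifs with h
    · rfl
    · rw [PySem.Dict.getD_of_not_contains _ _ (by simpa using h)]
      norm_num

-- one more character adds (its previous running count + 1) to A's counter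
theorem A_snd_append (cs : List Char) (ch : Char) (d : PySem.Dict Char Int) (acc : Int) :
    ((cs ++ [ch]).foldl countStep (d, acc)).2
      = (cs.foldl countStep (d, acc)).2 + (d.getD ch 0 + (cs.count ch : Int) + 1) := by
  rw [List.foldl_append]
  simp only [List.foldl_cons, List.foldl_nil, countStep]
  have hd := A_dict cs d acc
  split_ifs with h
  · rw [PySem.Dict.getD_insert_self, hd, PySem.Dict.getD_foldl_insert_add_one]
  · rw [PySem.Dict.getD_insert_self]
    have h0 : (cs.foldl countStep (d, acc)).1.getD ch 0 = 0 :=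
      PySem.Dict.getD_of_not_contains _ _ (by simpa using h)
    rw [hd, PySem.Dict.getD_foldl_insert_add_one] at h0
    omega

-- B's value as a sum over the distinct characters of the closed form on the total count
theorem B_as_sum (cs : List Char) :
    ((cs.foldl (fun d ch => d.insert ch (d.getD ch 0 + 1))
        (PySem.Dict.empty : PySem.Dict Char Int)).values.map
      (fun k => PySem.Int.floordiv (k * (k + 1)) 2)).sum
      = ((PySem.Set.ofList cs).map (fun c => triTerm ((cs.count c : Nat) : Int))).sum := by
  rw [PySem.Dict.foldl_insert_getD_add_one_eq_counter]
  simp only [PySem.Dict.values, PySem.Dict.items_counter, List.map_map]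
  rfl

-- replacing f by g at the single occurrence of ch in a duplicate-free list shifts the sum by g ch - f ch
theorem sum_map_change (S : List Char) (ch : Char) (f g : Char → Int)
    (hnd : S.Nodup) (hm : ch ∈ S) (hfg : ∀ c ∈ S, c ≠ ch → g c = f c) :
    (S.map g).sum = (S.map f).sum + (g ch - f ch) := by
  induction S with
  | nil => cases hm
  | cons a S ih =>
    rcases List.mem_cons.mp hm with rfl | hm'
    · have : S.map g = S.map f := by
        apply List.map_congr_left
        intro c hc
        exact hfg c (List.mem_cons_of_mem _ hc) (fun h => (List.nodup_cons.mp hnd).1 (h ▸ hc))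
      simp [this]; ring
    · have hne : a ≠ ch := fun h => (List.nodup_cons.mp hnd).1 (h ▸ hm')
      have := ih (List.nodup_cons.mp hnd).2 hm'
        (fun c hc h => hfg c (List.mem_cons_of_mem _ hc) h)
      simp only [List.map_cons, List.sum_cons, this, hfg a (List.mem_cons_self) hne]
      ring

-- the common recurrence, B side
theorem B_append (cs : List Char) (ch : Char) :
    ((PySem.Set.ofList (cs ++ [ch])).map
        (fun c => triTerm (((cs ++ [ch]).count c : Nat) : Int))).sum
      = ((PySem.Set.ofList cs).map (fun c => triTerm ((cs.count c : Nat) : Int))).sum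
        + ((cs.count ch : Nat) : Int) + 1 := by
  have hset : PySem.Set.ofList (cs ++ [ch]) = PySem.Set.add (PySem.Set.ofList cs) ch := by
    rw [PySem.Set.ofList_eq_foldl, PySem.Set.ofList_eq_foldl, List.foldl_append]
    rfl
  have hcount : ∀ c : Char, c ≠ ch → (cs ++ [ch]).count c = cs.count c := by
    intro c hc
    simp [List.count_append, Ne.symm hc]
  by_cases hmem : ch ∈ cs
  · have hadd : PySem.Set.add (PySem.Set.ofList cs) ch = PySem.Set.ofList cs := by
      simp [PySem.Set.add, PySem.Set.contains, PySem.Set.mem_ofList, hmem]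
    rw [hset, hadd]
    rw [sum_map_change (PySem.Set.ofList cs) ch
          (fun c => triTerm ((cs.count c : Nat) : Int))
          (fun c => triTerm (((cs ++ [ch]).count c : Nat) : Int))
          (PySem.Set.nodup_ofList cs)
          ((PySem.Set.mem_ofList _ _).mpr hmem)
          (fun c _ hc => by simp only [hcount c hc])]
    have hc : (cs ++ [ch]).count ch = cs.count ch + 1 := by
      simp [List.count_append]
    rw [hc]
    push_cast
    rw [triTerm_succ]
    ring
  · have hadd : PySem.Set.add (PySem.Set.ofList cs) ch = PySem.Set.ofList cs ++ [ch] := by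
      simp [PySem.Set.add, PySem.Set.contains, PySem.Set.mem_ofList, hmem]
    rw [hset, hadd, List.map_append, List.sum_append]
    have hmap : (PySem.Set.ofList cs).map (fun c => triTerm (((cs ++ [ch]).count c : Nat) : Int))
        = (PySem.Set.ofList cs).map (fun c => triTerm ((cs.count c : Nat) : Int)) := by
      apply List.map_congr_left
      intro c hc
      simp only [hcount c (fun h => hmem (h ▸ (PySem.Set.mem_ofList _ _).mp hc))]
    have hch : (cs ++ [ch]).count ch = 1 := by
      simp [List.count_append, List.count_eq_zero_of_not_mem hmem]
    have h0 : cs.count ch = 0 := List.count_eq_zero_of_not_mem hmem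
    rw [hmap]
    simp only [List.map_cons, List.map_nil, List.sum_cons, List.sum_nil, hch, h0,
      Nat.cast_one, Nat.cast_zero]
    have t1 : triTerm (1 : Int) = 1 := by decide
    rw [t1]
    ring

-- A's counter equals B's sum form, for every character list
theorem main_eq (cs : List Char) :
    (cs.foldl countStep ((PySem.Dict.empty : PySem.Dict Char Int), 0)).2
      = ((PySem.Set.ofList cs).map (fun c => triTerm ((cs.count c : Nat) : Int))).sum := by
  induction cs using List.reverseRecOn with
  | nil => rfl
  | append_singleton cs ch ih =>
    rw [A_snd_append, ih, B_append, PySem.Dict.getD_empty]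
    ring

-- ===== VERDICT (by name: the statement is the Claim_ definition above) =====
theorem count_spec : Claim_equal_count := by
  intro s _
  unfold Spec_count count count_alt
  have hlen : PySem.Str.len s = PySem.List.len s.toList := rfl
  have hfold : (PySem.List.pyRange 0 (PySem.List.len s.toList) 1).foldl
      (fun st i => countStep st (PySem.List.pyGetD s.toList i ' '))
      ((PySem.Dict.empty : PySem.Dict Char Int), 0)
      = s.toList.foldl countStep ((PySem.Dict.empty : PySem.Dict Char Int), 0) := by
    rw [← List.foldl_map, PySem.List.map_pyGetD_pyRange_zero]
  rw [hlen, hfold, main_eq, B_as_sum]
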